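-- pv_equiv track=rewrite | github.com/egalli64/pythonesque | ce/c190.py | solution
-- ===== SOURCE A (Python) =====
-- from itertools import permutations, product
--
-- def solution(line):
--     data = [int(x) for x in line.split()]
--     for numbers in permutations(data):
--         for operations in product('*+-', repeat=4):
--             result, *values = numbers
--             for value, op in zip(values, operations):
--                 if op == '+':
--                     result += value
--                 elif op == '-':
--                     result -= value
--                 else:
--                     result *= value
--             if result == 42:
--                 return 'YES'
--     return 'NO'
-- ===== SOURCE B (Python) =====
-- from itertools import permutations
--
--
-- def solution(line):
--     data = [int(x) for x in line.split()]
--     for numbers in permutations(data):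
--         result, *values = numbers
--         reachable = {result}
--         for value in values[:4]:
--             reachable = ({r + value for r in reachable}
--                          | {r - value for r in reachable}
--                          | {r * value for r in reachable})
--         if 42 in reachable:
--             return 'YES'
--     return 'NO'
-- ===== Notes on version B (the rewrite author's own statement) =====
-- stated objective: alternative
-- what changed: Replaces the inner enumeration of all 3^4 operator tuples per permutation by a forward reachable-value set folded over the first four values (with deduplication), checking 42 for membership.
import Mathlib
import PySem

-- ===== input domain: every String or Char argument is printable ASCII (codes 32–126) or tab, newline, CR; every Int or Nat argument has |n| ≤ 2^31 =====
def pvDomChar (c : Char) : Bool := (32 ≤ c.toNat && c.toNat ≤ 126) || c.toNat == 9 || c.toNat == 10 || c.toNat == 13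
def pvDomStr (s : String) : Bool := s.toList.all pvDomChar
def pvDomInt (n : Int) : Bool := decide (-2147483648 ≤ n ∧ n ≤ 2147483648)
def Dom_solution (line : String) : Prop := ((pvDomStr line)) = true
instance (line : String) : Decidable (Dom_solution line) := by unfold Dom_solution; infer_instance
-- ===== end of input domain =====

-- B replaces A's inner enumeration of all 3^4 operator tuples by a reachable-value set
-- folded over the first four values; same return value, different algorithm (alternative).


-- ===== PORT A =====
-- the characters '*+-' that product iterates over
def pvOpChars : List Char := ['*', '+', '-']

-- itertools.product(pvOpChars, repeat=n)
def pvProdRep : Nat → List (List Char)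
  | 0 => [[]]
  | n + 1 => pvOpChars.flatMap (fun c => (pvProdRep n).map (fun rest => c :: rest))

-- the inner 'for value, op in zip(values, operations)' accumulation loop
def pvApplyOps (result : Int) (pairs : List (Int × Char)) : Int :=
  pairs.foldl (fun result p =>
    if p.2 = '+' then result + p.1
    else if p.2 = '-' then result - p.1
    else result * p.1) result

def solution (line : String) : String :=
  let data := (PySem.Str.split₀ line).map (fun x => (PySem.Int.ofStr? x).getD 0)
  if (PySem.List.permutations data data.length).any (fun numbers =>
      (pvProdRep 4).any (fun operations =>
        match numbers with
        | result :: values => pvApplyOps result (values.zip operations) == 42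
        | [] => false))  -- unreachable under Pre_ (Python raises ValueError on empty unpack)
  then "YES" else "NO"

-- ===== PORT B =====
-- one step: {r+v for r in s} | {r-v for r in s} | {r*v for r in s}
def pvStep (s : PySem.Set Int) (v : Int) : PySem.Set Int :=
  PySem.Set.union
    (PySem.Set.union (PySem.Set.ofList (s.map (· + v))) (PySem.Set.ofList (s.map (· - v))))
    (PySem.Set.ofList (s.map (· * v)))

def solution_alt (line : String) : String :=
  let data := (PySem.Str.split₀ line).map (fun x => (PySem.Int.ofStr? x).getD 0)
  if (PySem.List.permutations data data.length).any (fun numbers =>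
      match numbers with
      | result :: values =>
        ((PySem.List.slice values none (some 4)).foldl pvStep
          (PySem.Set.ofList [result])).contains 42
      | [] => false)  -- unreachable under Pre_ (Python raises ValueError on empty unpack)
  then "YES" else "NO"

-- ===== PRECONDITION & SPEC =====
-- Pre_ excludes exactly the inputs where the Python raises ValueError: an empty/whitespace-only
-- line (empty unpacking target) and lines with a token that int() rejects.
def Pre_solution (line : String) : Prop :=
  PySem.Str.split₀ line ≠ [] ∧
  ∀ t ∈ PySem.Str.split₀ line, (PySem.Int.ofStr? t).isSome = true
instance (line : String) : Decidable (Pre_solution line) := by unfold Pre_solution; infer_instance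

def pvWitness_solution : String := "40 1 1"

def Spec_solution (line : String) (out : String) : Prop := out = solution_alt line
instance (line : String) (out : String) : Decidable (Spec_solution line out) := by unfold Spec_solution; infer_instance

-- ===== CLAIM (what is proved, stated in full; the proofs are below) =====
def Claim_equal_solution : Prop := ∀ (line : String), Dom_solution line → Pre_solution line → Spec_solution line (solution line)

-- ===== LEMMAS AND PROOFS =====

-- zip truncation, left and right
theorem pv_zip_take_left {α β : Type} (xs : List α) (ys : List β) :
    xs.zip ys = (xs.take ys.length).zip ys := by
  induction xs generalizing ys with
  | nil => simp
  | cons x xs ih =>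
    cases ys with
    | nil => simp
    | cons y ys =>
      simp only [List.length_cons, List.take_succ_cons, List.zip_cons_cons, ih ys]

theorem pv_zip_take_right {α β : Type} (xs : List α) (ys : List β) :
    xs.zip ys = xs.zip (ys.take xs.length) := by
  induction xs generalizing ys with
  | nil => simp
  | cons x xs ih =>
    cases ys with
    | nil => simp
    | cons y ys =>
      simp only [List.length_cons, List.take_succ_cons, List.zip_cons_cons, ih ys]

-- membership in the product list
theorem mem_pvProdRep (n : Nat) (ops : List Char) :
    ops ∈ pvProdRep n ↔ ops.length = n ∧ ∀ c ∈ ops, c ∈ pvOpChars := by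
  induction n generalizing ops with
  | zero => cases ops <;> simp [pvProdRep]
  | succ n ih =>
    cases ops with
    | nil => simp [pvProdRep]
    | cons c rest =>
      simp only [pvProdRep, List.mem_flatMap, List.mem_map]
      constructor
      · rintro ⟨c', hc', rest', hrest', heq⟩
        injection heq with h1 h2
        subst h1; subst h2
        obtain ⟨hl, hall⟩ := (ih rest').mp hrest'
        exact ⟨by simp [hl], by intro x hx; rcases List.mem_cons.mp hx with h | h
                                · exact h ▸ hc'
                                · exact hall x h⟩
      · rintro ⟨hl, hall⟩
        refine ⟨c, hall c (List.mem_cons_self ..), rest, (ih rest).mpr ⟨by simpa using hl, fun x hx => hall x (List.mem_cons_of_mem _ hx)⟩, rfl⟩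

-- membership in one reachable-set step
theorem mem_pvStep (s : PySem.Set Int) (v x : Int) :
    x ∈ pvStep s v ↔ ∃ r ∈ s, x = r + v ∨ x = r - v ∨ x = r * v := by
  simp only [pvStep, PySem.Set.mem_union, PySem.Set.mem_ofList, List.mem_map]
  constructor
  · rintro ((⟨r, hr, h⟩ | ⟨r, hr, h⟩) | ⟨r, hr, h⟩)
    · exact ⟨r, hr, Or.inl h.symm⟩
    · exact ⟨r, hr, Or.inr (Or.inl h.symm)⟩
    · exact ⟨r, hr, Or.inr (Or.inr h.symm)⟩
  · rintro ⟨r, hr, (h | h | h)⟩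
    · exact Or.inl (Or.inl ⟨r, hr, h.symm⟩)
    · exact Or.inl (Or.inr ⟨r, hr, h.symm⟩)
    · exact Or.inr ⟨r, hr, h.symm⟩

-- the reachable set after folding over ws is exactly the values of all op sequences of length |ws|
theorem mem_foldl_pvStep (ws : List Int) (s : PySem.Set Int) (x : Int) :
    x ∈ ws.foldl pvStep s ↔
      ∃ r ∈ s, ∃ ops : List Char, ops.length = ws.length ∧ (∀ c ∈ ops, c ∈ pvOpChars) ∧
        pvApplyOps r (ws.zip ops) = x := by
  induction ws generalizing s with
  | nil =>
    simp only [List.foldl_nil, List.length_nil]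
    constructor
    · intro hx; exact ⟨x, hx, [], rfl, by simp, rfl⟩
    · rintro ⟨r, hr, ops, hlen, _, happ⟩
      rw [List.length_eq_zero_iff.mp hlen] at happ
      simpa [pvApplyOps] using happ ▸ hr
  | cons w ws ih =>
    simp only [List.foldl_cons]
    rw [ih]
    constructor
    · rintro ⟨r', hr', ops, hlen, hall, happ⟩
      obtain ⟨r, hr, hcase⟩ := (mem_pvStep s w r').mp hr'
      rcases hcase with h | h | h
      · exact ⟨r, hr, '+' :: ops, by simp [hlen], by
          intro c hc; rcases List.mem_cons.mp hc with h' | h'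
          · simp [h', pvOpChars]
          · exact hall c h', by simp [pvApplyOps, List.zip] at happ ⊢; rw [← h]; exact happ⟩
      · exact ⟨r, hr, '-' :: ops, by simp [hlen], by
          intro c hc; rcases List.mem_cons.mp hc with h' | h'
          · simp [h', pvOpChars]
          · exact hall c h', by simp [pvApplyOps, List.zip] at happ ⊢; rw [← h]; exact happ⟩
      · exact ⟨r, hr, '*' :: ops, by simp [hlen], by
          intro c hc; rcases List.mem_cons.mp hc with h' | h'
          · simp [h', pvOpChars]
          · exact hall c h', by simp [pvApplyOps, List.zip] at happ ⊢; rw [← h]; exact happ⟩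
    · rintro ⟨r, hr, ops, hlen, hall, happ⟩
      cases ops with
      | nil => simp at hlen
      | cons c rest =>
        have hc := hall c (List.mem_cons_self ..)
        have hrest : ∀ c' ∈ rest, c' ∈ pvOpChars := fun c' h => hall c' (List.mem_cons_of_mem _ h)
        have hstep : ∀ y, y = (if c = '+' then r + w else if c = '-' then r - w else r * w) →
            y ∈ pvStep s w := by
          intro y hy
          refine (mem_pvStep s w y).mpr ⟨r, hr, ?_⟩
          by_cases h1 : c = '+'
          · simp only [h1, if_true] at hy; exact Or.inl hy
          · by_cases h2 : c = '-'
            · simp only [h2, if_true] at hy; exact Or.inr (Or.inl hy)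
            · simp only [h1, h2, if_false] at hy; exact Or.inr (Or.inr hy)
        refine ⟨(if c = '+' then r + w else if c = '-' then r - w else r * w), hstep _ rfl,
          rest, by simpa using hlen, hrest, ?_⟩
        simp only [pvApplyOps, List.zip_cons_cons, List.foldl_cons] at happ
        simpa [pvApplyOps] using happ

-- the per-permutation bodies of the two ports agree
theorem pv_body_eq (numbers : List Int) :
    (pvProdRep 4).any (fun operations =>
        match numbers with
        | result :: values => pvApplyOps result (values.zip operations) == 42
        | [] => false)
    = (match numbers with
        | result :: values =>
          ((PySem.List.slice values none (some 4)).foldl pvStep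
            (PySem.Set.ofList [result])).contains 42
        | [] => false) := by
  cases numbers with
  | nil => simp
  | cons result values =>
    simp only
    rw [show ((4 : Int)) = ((4 : Nat) : Int) by norm_num, PySem.List.slice_to_natCast]
    rw [Bool.eq_iff_iff, List.any_eq_true, PySem.Set.contains_iff, mem_foldl_pvStep]
    constructor
    · rintro ⟨ops, hops, heq⟩
      obtain ⟨hlen, hall⟩ := (mem_pvProdRep 4 ops).mp hops
      refine ⟨result, by simp [PySem.Set.ofList], ops.take (values.take 4).length,
        ?_, fun c hc => hall c (List.mem_of_mem_take hc), ?_⟩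
      · simp only [List.length_take, hlen]; omega
      · have h1 : values.zip ops = (values.take 4).zip ops := by
          rw [pv_zip_take_left values ops, hlen]
        have h2 : (values.take 4).zip ops = (values.take 4).zip (ops.take (values.take 4).length) :=
          pv_zip_take_right _ _
        rw [← h2, ← h1]
        exact of_decide_eq_true (by simpa using heq)
    · rintro ⟨r, hr, ops, hlen, hall, happ⟩
      have hr' : r = result := by simpa [PySem.Set.ofList] using hr
      subst hr'
      have hm : ops.length ≤ 4 := by rw [hlen]; simp
      refine ⟨ops ++ List.replicate (4 - ops.length) '*', (mem_pvProdRep 4 _).mpr ⟨by simp; omega, ?_⟩, ?_⟩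
      · intro c hc
        rcases List.mem_append.mp hc with h | h
        · exact hall c h
        · simp [List.eq_of_mem_replicate h, pvOpChars]
      · have h1 : values.zip (ops ++ List.replicate (4 - ops.length) '*')
            = (values.take 4).zip (ops ++ List.replicate (4 - ops.length) '*') := by
          rw [pv_zip_take_left values _]
          congr 1
          congr 1
          simp; omega
        have h2 : (values.take 4).zip (ops ++ List.replicate (4 - ops.length) '*')
            = (values.take 4).zip ops := by
          rw [pv_zip_take_right (values.take 4) (ops ++ _)]
          congr 1
          rw [← hlen, List.take_append_of_le_length (le_refl _), List.take_length]
        rw [h1, h2, happ]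
        decide

-- ===== VERDICT (by name: the statement is the Claim_ definition above) =====
theorem solution_spec : Claim_equal_solution := by
  intro line _ _
  show solution line = solution_alt line
  simp only [solution, solution_alt]
  rw [PySem.List.any_congr_mem (fun numbers _ => pv_body_eq numbers)]
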